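-- pv_equiv track=rewrite | github.com/mattjen104/Rachael | tools/epic_agent.py | _generate_hint_keys
-- ===== SOURCE A (Python) =====
-- def _generate_hint_keys(count):
--     """Generate Vimium-style hint keys: a-z, then aa-az, ba-bz, etc."""
--     keys = []
--     singles = "asdfghjklqwertyuiopzxcvbnm"
--     for ch in singles:
--         keys.append(ch)
--         if len(keys) >= count:
--             return keys[:count]
--     for first in singles:
--         for second in singles:
--             keys.append(first + second)
--             if len(keys) >= count:
--                 return keys[:count]
--     return keys[:count]
-- ===== SOURCE B (Python) =====
-- def _generate_hint_keys(count):
--     """Generate Vimium-style hint keys: a-z, then aa-az, ba-bz, etc."""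
--     singles = "asdfghjklqwertyuiopzxcvbnm"
--     n = min(max(count, 0), 26 + 26 * 26)
--
--     def key(i):
--         if i < 26:
--             return singles[i]
--         q, r = divmod(i - 26, 26)
--         return singles[q] + singles[r]
--
--     return [key(i) for i in range(n)]
-- ===== Notes on version B (the rewrite author's own statement) =====
-- stated objective: alternative
-- what changed: B replaces A's incremental append-and-length-check loops by closed-form indexing: it clamps the count to the total hint capacity and computes the i-th hint directly via divmod into the alphabet (a single character for small indices, otherwise the quotient and remainder characters), so no hint list is grown and no pair loop exists.
import Mathlib
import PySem

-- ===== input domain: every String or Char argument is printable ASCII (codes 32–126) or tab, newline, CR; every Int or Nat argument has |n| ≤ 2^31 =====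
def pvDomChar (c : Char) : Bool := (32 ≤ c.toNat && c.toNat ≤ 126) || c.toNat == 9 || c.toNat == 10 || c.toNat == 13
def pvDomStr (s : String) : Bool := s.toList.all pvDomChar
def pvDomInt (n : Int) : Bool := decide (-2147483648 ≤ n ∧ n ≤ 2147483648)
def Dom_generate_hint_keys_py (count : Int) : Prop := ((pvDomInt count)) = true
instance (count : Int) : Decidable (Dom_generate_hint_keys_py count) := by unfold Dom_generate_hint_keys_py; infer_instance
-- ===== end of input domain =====

-- B computes each hint directly from its index (divmod into the alphabet) instead of A's append-and-check loops (objective: alternative).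

-- ===== PORT A =====
-- A's two for-loops share one shape: append f(ch) to keys, early-return keys[:count] when len(keys) >= count.
def pvAppendLoop (f : Char → String) : List Char → List String → Int → (List String ⊕ List String)
  | [], keys, _ => .inr keys
  | c :: rest, keys, count =>
    let keys' := keys ++ [f c]
    if count ≤ (keys'.length : Int) then .inl (PySem.List.slice keys' none (some count))
    else pvAppendLoop f rest keys' count

-- the outer loop of the second (pairs) stage: for first in singles: (inner loop over second)
def pvOuterLoop : List Char → List Char → List String → Int → (List String ⊕ List String)
  | [], _, keys, _ => .inr keys
  | first :: rest, singles, keys, count =>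
    match pvAppendLoop (fun second => first.toString ++ second.toString) singles keys count with
    | .inl r => .inl r
    | .inr keys' => pvOuterLoop rest singles keys' count

def generate_hint_keys_py (count : Int) : List String :=
  let singles := "asdfghjklqwertyuiopzxcvbnm".toList
  match pvAppendLoop (fun ch => ch.toString) singles [] count with
  | .inl r => r
  | .inr keys =>
    match pvOuterLoop singles singles keys count with
    | .inl r => r
    | .inr keys' => PySem.List.slice keys' none (some count)   -- keys[:count]

-- ===== PORT B =====
-- Source B's nested helper key(i): the i-th hint by closed form. The index is always in range
-- (i < 702), so the getD default is unreachable; Nat / and % agree with Python's divmod here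
-- because both arguments are nonnegative.
def pvKeyB (singles : List Char) (i : Nat) : String :=
  if i < 26 then (singles[i]?.getD 'a').toString
  else
    let q := (i - 26) / 26
    let r := (i - 26) % 26
    (singles[q]?.getD 'a').toString ++ (singles[r]?.getD 'a').toString

def generate_hint_keys_py_alt (count : Int) : List String :=
  let singles := "asdfghjklqwertyuiopzxcvbnm".toList
  let n := (min (max count 0) (26 + 26 * 26)).toNat   -- min(max(count,0), 26 + 26*26); nonneg, so range(n) = List.range n
  (List.range n).map (pvKeyB singles)

-- ===== PRECONDITION & SPEC =====
def Spec_generate_hint_keys_py (count : Int) (out : List String) : Prop := out = generate_hint_keys_py_alt count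
instance (count : Int) (out : List String) : Decidable (Spec_generate_hint_keys_py count out) := by unfold Spec_generate_hint_keys_py; infer_instance

-- ===== CLAIM (what is proved, stated in full; the proofs are below) =====
def Claim_equal_generate_hint_keys_py : Prop := ∀ (count : Int), Dom_generate_hint_keys_py count → Spec_generate_hint_keys_py count (generate_hint_keys_py count)

-- ===== LEMMAS AND PROOFS =====

-- the append-and-check loop, entered with len(keys) < count, either early-returns the
-- first `count` of the fully extended list, or ends with all of cs appended
theorem pvAppendLoop_spec (f : Char → String) (cs : List Char) (keys : List String)
    (count : Int) (h : (keys.length : Int) < count) :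
    pvAppendLoop f cs keys count =
      if count ≤ ((keys.length + cs.length : Nat) : Int)
      then .inl ((keys ++ cs.map f).take count.toNat)
      else .inr (keys ++ cs.map f) := by
  induction cs generalizing keys with
  | nil => simp [pvAppendLoop]; omega
  | cons c rest ih =>
    rw [pvAppendLoop]
    by_cases hc : count ≤ ((keys ++ [f c]).length : Int)
    · have hlen : count = ((keys ++ [f c]).length : Int) := by
        simp at hc ⊢; omega
      rw [if_pos hc]
      have h0 : (0:Int) ≤ count := by simp at hlen; omega
      rw [PySem.List.slice_to _ h0]
      have htn : count.toNat = (keys ++ [f c]).length := by omega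
      have hcond : count ≤ ((keys.length + (c :: rest).length : Nat) : Int) := by
        simp at hlen ⊢; omega
      rw [if_pos hcond, htn, List.take_length]
      have : keys ++ (c :: rest).map f = (keys ++ [f c]) ++ rest.map f := by simp
      rw [this, List.take_left]
    · rw [if_neg hc]
      have h' : (((keys ++ [f c]).length : Nat) : Int) < count := by
        simp at hc ⊢; omega
      rw [ih _ h']
      have heq : (keys ++ [f c]) ++ rest.map f = keys ++ (c :: rest).map f := by simp
      by_cases h2 : count ≤ ((keys.length + (c :: rest).length : Nat) : Int)
      · rw [if_pos (by simp at h2 ⊢; omega), if_pos h2, heq]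
      · rw [if_neg (by simp at h2 ⊢; omega), if_neg h2, heq]

theorem pvOuterLoop_spec (fs singles : List Char) (keys : List String)
    (count : Int) (h : (keys.length : Int) < count) :
    pvOuterLoop fs singles keys count =
      if count ≤ ((keys.length + fs.length * singles.length : Nat) : Int)
      then .inl ((keys ++ fs.flatMap (fun a => singles.map (fun b => a.toString ++ b.toString))).take count.toNat)
      else .inr (keys ++ fs.flatMap (fun a => singles.map (fun b => a.toString ++ b.toString))) := by
  induction fs generalizing keys with
  | nil => simp [pvOuterLoop]; omega
  | cons a rest ih =>
    rw [pvOuterLoop, pvAppendLoop_spec _ _ _ _ h]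
    by_cases hc : count ≤ ((keys.length + singles.length : Nat) : Int)
    · rw [if_pos hc]
      have hcond : count ≤ ((keys.length + (a :: rest).length * singles.length : Nat) : Int) := by
        simp at hc ⊢; nlinarith [Nat.zero_le (rest.length * singles.length)]
      rw [if_pos hcond]
      have hle : count.toNat ≤ (keys ++ singles.map (fun b => a.toString ++ b.toString)).length := by
        simp at hc ⊢; omega
      have hsplit : keys ++ (a :: rest).flatMap (fun a => singles.map (fun b => a.toString ++ b.toString))
          = (keys ++ singles.map (fun b => a.toString ++ b.toString))
            ++ rest.flatMap (fun a => singles.map (fun b => a.toString ++ b.toString)) := by simp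
      rw [hsplit, List.take_append_of_le_length hle]
    · rw [if_neg hc]
      have h' : (((keys ++ singles.map (fun b => a.toString ++ b.toString)).length : Nat) : Int) < count := by
        simp at hc ⊢; omega
      dsimp only
      rw [ih _ h']
      have heq : (keys ++ singles.map (fun b => a.toString ++ b.toString))
            ++ rest.flatMap (fun a => singles.map (fun b => a.toString ++ b.toString))
          = keys ++ (a :: rest).flatMap (fun a => singles.map (fun b => a.toString ++ b.toString)) := by simp
      have harith : ((keys ++ singles.map (fun b => a.toString ++ b.toString)).length
            + rest.length * singles.length : Nat)
          = (keys.length + (a :: rest).length * singles.length : Nat) := by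
        simp [Nat.succ_mul]; omega
      by_cases h2 : count ≤ ((keys.length + (a :: rest).length * singles.length : Nat) : Int)
      · rw [if_pos (by rw [harith]; exact h2), if_pos h2, heq]
      · rw [if_neg (by rw [harith]; exact h2), if_neg h2, heq]

-- the first iteration of A's first loop when count <= 0: append one key, early-return [f c][:count] = []
theorem pvAppendLoop_nonpos (f : Char → String) (c : Char) (cs : List Char)
    (count : Int) (h : count ≤ 0) :
    pvAppendLoop f (c :: cs) [] count = .inl [] := by
  rw [pvAppendLoop]
  simp only [List.nil_append]
  rw [if_pos (by simp; omega)]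
  rcases eq_or_lt_of_le h with heq | hlt
  · rw [heq, PySem.List.slice_to _ (le_refl 0)]
    simp
  · have hk : count = -(((-count).toNat : Nat) : Int) := by omega
    rw [hk, PySem.List.slice_to_neg_natCast _ _ (by omega)]
    simp
    omega

set_option maxRecDepth 4000 in
-- the full 702-element list A builds equals the closed-form indexing of B, index by index
theorem pvFull_eq :
    "asdfghjklqwertyuiopzxcvbnm".toList.map (fun ch => ch.toString)
      ++ "asdfghjklqwertyuiopzxcvbnm".toList.flatMap
          (fun a => "asdfghjklqwertyuiopzxcvbnm".toList.map (fun b => a.toString ++ b.toString))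
    = (List.range 702).map (pvKeyB "asdfghjklqwertyuiopzxcvbnm".toList) := by
  decide

-- taking m of the full list is B's map over range (min m 702)
theorem pvTake_full (m : Nat) :
    ("asdfghjklqwertyuiopzxcvbnm".toList.map (fun ch => ch.toString)
      ++ "asdfghjklqwertyuiopzxcvbnm".toList.flatMap
          (fun a => "asdfghjklqwertyuiopzxcvbnm".toList.map (fun b => a.toString ++ b.toString))).take m
    = (List.range (min m 702)).map (pvKeyB "asdfghjklqwertyuiopzxcvbnm".toList) := by
  rw [pvFull_eq, ← List.map_take, List.take_range]

-- ===== VERDICT (by name: the statement is the Claim_ definition above) =====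
theorem generate_hint_keys_py_spec : Claim_equal_generate_hint_keys_py := by
  intro count _
  unfold Spec_generate_hint_keys_py generate_hint_keys_py generate_hint_keys_py_alt
  dsimp only
  by_cases h0 : count ≤ 0
  · -- count <= 0: A early-returns on the first append; B maps over range 0
    have hsing : "asdfghjklqwertyuiopzxcvbnm".toList
        = 'a' :: "sdfghjklqwertyuiopzxcvbnm".toList := by decide
    rw [hsing, pvAppendLoop_nonpos _ _ _ _ h0]
    have : (min (max count 0) (26 + 26 * 26)).toNat = 0 := by omega
    rw [this]
    simp
  · have hn : (min (max count 0) (26 + 26 * 26)).toNat = min count.toNat 702 := by omega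
    rw [hn, pvAppendLoop_spec _ _ _ _ (by simp; omega)]
    by_cases h26 : count ≤ ((([] : List String).length + "asdfghjklqwertyuiopzxcvbnm".toList.length : Nat) : Int)
    · -- answered within the singles loop: A = singles-map prefix taken to count
      rw [if_pos h26]
      dsimp only
      simp only [List.nil_append]
      have hle : count.toNat ≤ ("asdfghjklqwertyuiopzxcvbnm".toList.map (fun ch => ch.toString)).length := by
        simp at h26 ⊢; omega
      rw [← List.take_append_of_le_length (l₂ := "asdfghjklqwertyuiopzxcvbnm".toList.flatMap
            (fun a => "asdfghjklqwertyuiopzxcvbnm".toList.map (fun b => a.toString ++ b.toString))) hle,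
          pvTake_full]
    · rw [if_neg h26]
      dsimp only
      simp only [List.nil_append]
      rw [pvOuterLoop_spec _ _ _ _ (by simp at h26 ⊢; omega)]
      by_cases h702 : count ≤ ((("asdfghjklqwertyuiopzxcvbnm".toList.map (fun ch => ch.toString)).length
            + "asdfghjklqwertyuiopzxcvbnm".toList.length * "asdfghjklqwertyuiopzxcvbnm".toList.length : Nat) : Int)
      · -- answered within the pairs loop
        rw [if_pos h702]
        dsimp only
        rw [pvTake_full]
      · -- loops exhausted: keys[:count] of the full 702-list
        rw [if_neg h702]
        dsimp only
        rw [PySem.List.slice_to _ (by omega), pvTake_full]
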